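-- pv_equiv track=rewrite | github.com/nemtiax/EvoBF | executor.py | _build_bracket_map
-- ===== SOURCE A (Python) =====
-- from typing import Iterable, List, Mapping
--
-- def _build_bracket_map(program: str) -> Mapping[int, int]:
--     """Pre-compute matching bracket positions.
--
--     Unmatched brackets are ignored and simply not present in the resulting map.
--     """
--     stack: List[int] = []
--     pairs: dict[int, int] = {}
--     for pos, char in enumerate(program):
--         if char == "[":
--             stack.append(pos)
--         elif char == "]":
--             if stack:
--                 open_pos = stack.pop()
--                 pairs[open_pos] = pos
--                 pairs[pos] = open_pos
--     # Unmatched '[' are ignored by leaving them out of the map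
--     return pairs
-- ===== SOURCE B (Python) =====
-- def _build_bracket_map(program: str):
--     """Pre-compute matching bracket positions by backward scan per ']'.
--
--     Unmatched brackets are ignored and simply not present in the resulting map.
--     """
--     pairs = {}
--     for j in range(len(program)):
--         if program[j] == ']':
--             depth = 1
--             k = j - 1
--             while k >= 0:
--                 c = program[k]
--                 if c == ']':
--                     depth += 1
--                 elif c == '[':
--                     depth -= 1
--                     if depth == 0:
--                         pairs[k] = j
--                         pairs[j] = k
--                         break
--                 k -= 1
--     return pairs
-- ===== Notes on version B (the rewrite author's own statement) =====
-- stated objective: alternative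
-- what changed: Replaces the single left-to-right pass with an explicit stack by an independent backward depth-counting scan from each closing bracket that locates its match directly, with no stack at all.
import Mathlib
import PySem

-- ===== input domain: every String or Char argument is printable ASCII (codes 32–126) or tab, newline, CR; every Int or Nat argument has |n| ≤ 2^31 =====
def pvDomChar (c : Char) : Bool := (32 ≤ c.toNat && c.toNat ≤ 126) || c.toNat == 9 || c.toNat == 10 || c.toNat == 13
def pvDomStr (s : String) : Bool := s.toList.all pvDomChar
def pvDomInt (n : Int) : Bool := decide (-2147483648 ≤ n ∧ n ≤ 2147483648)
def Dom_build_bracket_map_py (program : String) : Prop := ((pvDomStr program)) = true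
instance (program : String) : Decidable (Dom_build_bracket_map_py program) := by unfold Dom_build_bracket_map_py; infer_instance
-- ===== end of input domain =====

-- B replaces A's single stack-based pass by an independent backward depth-counting scan
-- from each closing bracket (no stack); same return value; objective: alternative.

-- ===== PORT A =====
-- one stack pass: push opening positions, pop and record both directions on each matched close
def build_bracket_map_py (program : String) : List (Int × Int) :=
  ((PySem.List.enumerate program.toList 0).foldl
    (fun (st : List Int × PySem.Dict Int Int) (pc : Int × Char) =>
      if pc.2 = '[' then (st.1 ++ [pc.1], st.2)
      else if pc.2 = ']' then
        match st.1.getLast? with   -- 'if stack:' then 'stack.pop()'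
        | some open_pos => (st.1.dropLast, (st.2.insert open_pos pc.1).insert pc.1 open_pos)
        | none => st
      else st)
    ([], PySem.Dict.empty)).2.items

-- ===== PORT B =====
-- the backward-scan while loop of Source B; k counts the remaining positions below the cursor
def pvBackscan (cs : List Char) (k : Nat) (depth : Nat) : Option Nat :=
  match k with
  | 0 => none
  | k' + 1 =>
    if cs.getD k' ' ' = ']' then pvBackscan cs k' (depth + 1)
    else if cs.getD k' ' ' = '[' then
      if depth = 1 then some k' else pvBackscan cs k' (depth - 1)
    else pvBackscan cs k' depth

def build_bracket_map_py_alt (program : String) : List (Int × Int) :=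
  let cs := program.toList
  ((List.range cs.length).foldl
    (fun (pairs : PySem.Dict Int Int) (j : Nat) =>
      if cs.getD j ' ' = ']' then
        match pvBackscan cs j 1 with
        | some k => (pairs.insert (k : Int) (j : Int)).insert (j : Int) (k : Int)
        | none => pairs
      else pairs)
    PySem.Dict.empty).items

-- ===== PRECONDITION & SPEC =====
def Spec_build_bracket_map_py (program : String) (out : List (Int × Int)) : Prop := out = build_bracket_map_py_alt program
instance (program : String) (out : List (Int × Int)) : Decidable (Spec_build_bracket_map_py program out) := by unfold Spec_build_bracket_map_py; infer_instance

-- ===== CLAIM (what is proved, stated in full; the proofs are below) =====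
def Claim_equal_build_bracket_map_py : Prop := ∀ (program : String), Dom_build_bracket_map_py program → Spec_build_bracket_map_py program (build_bracket_map_py program)

-- ===== LEMMAS AND PROOFS =====

-- the unmatched-opening-bracket stack after processing the first t characters (A's loop state)
def pvStk (cs : List Char) (t : Nat) : List Nat :=
  (List.range t).foldl
    (fun s j => if cs.getD j ' ' = '[' then s ++ [j]
                else if cs.getD j ' ' = ']' then s.dropLast else s) []

lemma pvStk_succ (cs : List Char) (t : Nat) :
    pvStk cs (t + 1) =
      (if cs.getD t ' ' = '[' then pvStk cs t ++ [t]
       else if cs.getD t ' ' = ']' then (pvStk cs t).dropLast else pvStk cs t) := by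
  simp [pvStk, List.range_succ]

lemma pvBackscan_eq (cs : List Char) : ∀ (k d : Nat),
    pvBackscan cs k (d + 1) = (pvStk cs k).reverse[d]? := by
  intro k
  induction k with
  | zero => intro d; simp [pvBackscan, pvStk]
  | succ k ih =>
    intro d
    rw [pvStk_succ, pvBackscan]
    generalize cs.getD k ' ' = c
    by_cases hc : c = ']'
    · rw [if_pos hc, if_neg (by rw [hc]; decide), if_pos hc, ih (d + 1),
        ← List.tail_reverse, List.getElem?_tail]
    · by_cases ho : c = '['
      · rw [if_neg hc, if_pos ho, if_pos ho]
        cases d with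
        | zero => simp
        | succ d' =>
          rw [if_neg (by omega), Nat.add_sub_cancel, ih d']
          rw [List.reverse_append]
          simp
      · rw [if_neg hc, if_neg ho, if_neg ho, if_neg hc, ih d]

-- enumerate over a string is the index range paired with getD lookups
lemma pvEnumerate_eq (cs : List Char) :
    PySem.List.enumerate cs 0 =
      (List.range cs.length).map (fun (j : Nat) => ((j : Int), cs.getD j ' ')) := by
  apply List.ext_getElem?
  intro k
  rw [PySem.List.getElem?_enumerate, List.getElem?_map]
  by_cases h : k < cs.length
  · rw [List.getElem?_range h, List.getElem?_eq_getElem h]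
    simp [List.getElem?_eq_getElem h]
  · rw [List.getElem?_eq_none (by omega : cs.length ≤ k),
      List.getElem?_eq_none (by simpa using (by omega : cs.length ≤ k))]
    rfl

-- joint loop invariant: A's state after t steps is (the stack, B's dict after t steps)
lemma pvMain (cs : List Char) : ∀ (t : Nat),
    (List.range t).foldl
      (fun (st : List Int × PySem.Dict Int Int) (j : Nat) =>
        (fun (st : List Int × PySem.Dict Int Int) (pc : Int × Char) =>
          if pc.2 = '[' then (st.1 ++ [pc.1], st.2)
          else if pc.2 = ']' then
            match st.1.getLast? with
            | some open_pos => (st.1.dropLast, (st.2.insert open_pos pc.1).insert pc.1 open_pos)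
            | none => st
          else st) st ((j : Int), cs.getD j ' '))
      ([], PySem.Dict.empty)
    = ((pvStk cs t).map (fun (i : Nat) => (i : Int)),
       (List.range t).foldl
         (fun (pairs : PySem.Dict Int Int) (j : Nat) =>
           if cs.getD j ' ' = ']' then
             match pvBackscan cs j 1 with
             | some k => (pairs.insert (k : Int) (j : Int)).insert (j : Int) (k : Int)
             | none => pairs
           else pairs)
         PySem.Dict.empty) := by
  intro t
  induction t with
  | zero => simp [pvStk]
  | succ t ih =>
    rw [List.range_succ, List.foldl_append, List.foldl_append, ih, pvStk_succ]
    simp only [List.foldl_cons, List.foldl_nil]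
    have hb : pvBackscan cs t 1 = (pvStk cs t).getLast? := by
      rw [pvBackscan_eq cs t 0, ← List.head?_eq_getElem?, List.head?_reverse]
    rw [hb]
    generalize cs.getD t ' ' = c
    by_cases ho : c = '['
    · subst ho
      simp
    · by_cases hc : c = ']'
      · subst hc
        simp only [reduceIte, List.getLast?_map]
        cases h : (pvStk cs t).getLast? with
        | none => simp [List.getLast?_eq_none_iff.mp h]
        | some i => simp [List.map_dropLast]
      · simp only [if_neg ho, if_neg hc]

-- ===== VERDICT (by name: the statement is the Claim_ definition above) =====
theorem build_bracket_map_py_spec : Claim_equal_build_bracket_map_py := by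
  intro program _
  unfold Spec_build_bracket_map_py build_bracket_map_py build_bracket_map_py_alt
  rw [pvEnumerate_eq, List.foldl_map, pvMain program.toList program.toList.length]
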